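-- pv_equiv track=rewrite | github.com/CritBear/nc_gesture | classifier/train.py | action_to_index_dict
-- ===== SOURCE A (Python) =====
-- def process_file_name(file_name):
--     d = file_name.split('_')
--     action =''.join(d[:-2])
--     return action
--
-- def action_to_index_dict(data):
--     dic = dict()
--     index = 0
--     for d in data:
--         p = process_file_name(d['file_name'])
--         if p not in dic:
--             dic[p] = index
--             index += 1
--     return dic
-- ===== SOURCE B (Python) =====
-- def process_file_name(file_name):
--     d = file_name.split('_')
--     action = ''.join(d[:-2])
--     return action
--
--
-- def action_to_index_dict(data):
--     # Selection-style: repeatedly take the first remaining name, assign it the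
--     # next index, and filter out all of its occurrences; no membership test.
--     names = [process_file_name(d['file_name']) for d in data]
--     dic = {}
--     index = 0
--     while names:
--         p = names[0]
--         dic[p] = index
--         index += 1
--         names = [q for q in names if q != p]
--     return dic
-- ===== Notes on version B (the rewrite author's own statement) =====
-- stated objective: alternative
-- what changed: Replaces A's single pass with a dict-membership test and inline counter by a selection-style loop: repeatedly take the first remaining derived name, assign it the next index, and filter out all of its occurrences from the remaining list.
import Mathlib
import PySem

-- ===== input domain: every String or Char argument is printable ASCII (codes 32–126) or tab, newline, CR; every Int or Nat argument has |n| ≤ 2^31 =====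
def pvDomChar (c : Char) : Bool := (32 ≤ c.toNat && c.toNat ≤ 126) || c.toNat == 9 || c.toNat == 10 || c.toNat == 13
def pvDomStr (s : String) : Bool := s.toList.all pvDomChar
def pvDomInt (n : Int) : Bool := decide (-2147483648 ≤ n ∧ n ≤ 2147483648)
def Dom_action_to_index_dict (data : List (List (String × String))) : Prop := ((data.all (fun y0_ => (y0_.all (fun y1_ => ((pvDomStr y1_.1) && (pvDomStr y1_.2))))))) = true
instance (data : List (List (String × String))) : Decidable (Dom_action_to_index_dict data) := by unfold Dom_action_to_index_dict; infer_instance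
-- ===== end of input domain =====

-- B replaces A's single pass (membership test against the dict + inline counter) by a
-- selection-style loop: take the first remaining derived name, give it the next index,
-- filter out all of its occurrences; objective: alternative algorithm, same result.

-- ===== PORT A =====
-- shared helper, identical in Source A and Source B
def process_file_name (file_name : String) : String :=
  let d := (PySem.Str.split? file_name "_").getD []  -- separator "_" ≠ "", so split? is always some
  PySem.Str.join "" (PySem.List.slice d none (some (-2)))

-- d['file_name']: first-match lookup; Pre_ guarantees the key is present, so the default never fires
def pvFileName (d : List (String × String)) : String :=
  (List.lookup "file_name" d).getD ""

def action_to_index_dict (data : List (List (String × String))) : List (String × Int) :=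
  (data.foldl
    (fun (st : PySem.Dict String Int × Int) d =>
      let p := process_file_name (pvFileName d)
      if st.1.contains p then st else (st.1.insert p st.2, st.2 + 1))
    (PySem.Dict.empty, 0)).1.items

-- ===== PORT B =====
-- the while loop of Source B: names, dic, index are the loop state; each round takes names[0],
-- inserts it with the current index, and filters every occurrence out of names
def pvBLoop : List String → PySem.Dict String Int → Int → PySem.Dict String Int
  | [], dic, _ => dic
  | p :: rest, dic, index =>
      pvBLoop ((p :: rest).filter (fun q => !(q == p))) (dic.insert p index) (index + 1)
  termination_by names _ _ => names.length
  decreasing_by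
    simp only [List.filter, beq_self_eq_true, Bool.not_true]
    exact Nat.lt_succ_of_le (List.length_filter_le _ _)

def action_to_index_dict_alt (data : List (List (String × String))) : List (String × Int) :=
  let names := data.map (fun d => process_file_name (pvFileName d))
  (pvBLoop names PySem.Dict.empty 0).items

-- ===== PRECONDITION & SPEC =====
-- Pre_ excludes exactly the inputs where some record lacks the 'file_name' key: there A (and B) raise KeyError.
def Pre_action_to_index_dict (data : List (List (String × String))) : Prop :=
  ∀ d ∈ data, "file_name" ∈ d.map Prod.fst
instance (data : List (List (String × String))) : Decidable (Pre_action_to_index_dict data) := by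
  unfold Pre_action_to_index_dict; infer_instance

def pvWitness_action_to_index_dict : (List (List (String × String))) :=
  [[("file_name", "walk_01_v1")], [("file_name", "run_02_v1")]]

def Spec_action_to_index_dict (data : List (List (String × String))) (out : List (String × Int)) : Prop := out = action_to_index_dict_alt data
instance (data : List (List (String × String))) (out : List (String × Int)) : Decidable (Spec_action_to_index_dict data out) := by unfold Spec_action_to_index_dict; infer_instance

-- ===== CLAIM (what is proved, stated in full; the proofs are below) =====
def Claim_equal_action_to_index_dict : Prop := ∀ (data : List (List (String × String))), Dom_action_to_index_dict data → Pre_action_to_index_dict data → Spec_action_to_index_dict data (action_to_index_dict data)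

-- ===== LEMMAS AND PROOFS =====

-- reference recursion characterising A: first occurrence of each name not yet in `seen`, indexed from `i`
def pvRef : List String → List String → Int → List (String × Int)
  | [], _, _ => []
  | q :: qs, seen, i =>
    if q ∈ seen then pvRef qs seen i else (q, i) :: pvRef qs (seen ++ [q]) (i + 1)

theorem pvContains_eq_mem_keys (D : PySem.Dict String Int) (q : String) :
    D.contains q = decide (q ∈ D.keys) := by
  simp only [PySem.Dict.contains, PySem.Dict.keys]
  rcases h : D.items.any fun p => p.1 == q with _ | _
  · simp_all
    intro x hx
    exact h q x hx rfl
  · simp_all [List.any_eq_true]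

theorem pvA_fold (qs : List String) : ∀ (D : PySem.Dict String Int) (i : Int),
    ((qs.foldl (fun (st : PySem.Dict String Int × Int) p =>
        if st.1.contains p then st else (st.1.insert p st.2, st.2 + 1)) (D, i)).1).items
      = D.items ++ pvRef qs D.keys i := by
  induction qs with
  | nil => intro D i; simp [pvRef]
  | cons q qs ih =>
    intro D i
    simp only [List.foldl_cons, pvRef]
    rcases hc : D.contains q with _ | _
    · have h : q ∉ D.keys := by simpa [pvContains_eq_mem_keys] using hc
      have hins : D.insert q i = PySem.Dict.mk (D.items ++ [(q, i)]) := by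
        simp [PySem.Dict.insert, hc]
      have hk : (D.insert q i).keys = D.keys ++ [q] := by
        simp [hins, PySem.Dict.keys]
      simp only [Bool.false_eq_true, if_false, if_neg h]
      rw [ih, hk, hins]
      simp
    · have h : q ∈ D.keys := by simpa [pvContains_eq_mem_keys] using hc
      simp only [if_true, if_pos h]
      exact ih D i

-- names already in seen may be filtered away without changing the result
theorem pvRef_filter (qs : List String) : ∀ (seen : List String) (i : Int) (q : String),
    q ∈ seen → pvRef qs seen i = pvRef (qs.filter (fun x => !(x == q))) seen i := by
  induction qs with
  | nil => intro _ _ _ _; simp [pvRef]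
  | cons a qs ih =>
    intro seen i q hq
    by_cases haq : a = q
    · subst haq
      simp only [List.filter, beq_self_eq_true, Bool.not_true, pvRef, if_pos hq]
      exact ih seen i a hq
    · have : (!(a == q)) = true := by simp [haq]
      simp only [List.filter, this, pvRef]
      by_cases ha : a ∈ seen
      · rw [if_pos ha, if_pos ha]; exact ih seen i q hq
      · rw [if_neg ha, if_neg ha]
        exact congrArg _ (ih (seen ++ [a]) (i + 1) q (by simp [hq]))

-- B's selection loop, abstracted to the name list, equals the reference recursion
theorem pvLoop_eq_pvRef (n : Nat) : ∀ (qs : List String), qs.length ≤ n →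
    ∀ (D : PySem.Dict String Int) (i : Int), (∀ x ∈ qs, x ∉ D.keys) →
    (pvBLoop qs D i).items = D.items ++ pvRef qs D.keys i := by
  induction n with
  | zero =>
    intro qs hlen D i _
    have : qs = [] := List.eq_nil_of_length_eq_zero (Nat.le_zero.mp hlen)
    subst this; simp [pvBLoop, pvRef]
  | succ n ih =>
    intro qs hlen D i hfresh
    match qs with
    | [] => simp [pvBLoop, pvRef]
    | p :: rest =>
      have hp : p ∉ D.keys := hfresh p (by simp)
      have hc : D.contains p = false := by
        simp [pvContains_eq_mem_keys, hp]
      have hins : D.insert p i = PySem.Dict.mk (D.items ++ [(p, i)]) := by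
        simp [PySem.Dict.insert, hc]
      have hk : (D.insert p i).keys = D.keys ++ [p] := by
        simp [hins, PySem.Dict.keys]
      have hfilter : (p :: rest).filter (fun q => !(q == p)) = rest.filter (fun q => !(q == p)) := by
        simp [List.filter]
      have hlen' : (rest.filter (fun q => !(q == p))).length ≤ n :=
        Nat.le_of_lt_succ (Nat.lt_of_le_of_lt (List.length_filter_le _ _) (by simpa using hlen))
      rw [pvBLoop, hfilter,
        ih _ hlen' (D.insert p i) (i + 1) ?fresh]
      · rw [hk, hins]
        simp only [List.append_assoc, List.singleton_append]
        congr 1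
        -- pvRef (p::rest) D.keys i = (p, i) :: pvRef (filtered rest) (D.keys ++ [p]) (i+1)
        have h0 : pvRef (p :: rest) D.keys i
            = (p, i) :: pvRef rest (D.keys ++ [p]) (i + 1) := by
          simp [pvRef, hp]
        rw [h0, pvRef_filter rest (D.keys ++ [p]) (i + 1) p (by simp)]
      case fresh =>
        intro x hx
        have hxr : x ∈ rest.filter (fun q => !(q == p)) := hx
        have hxp : x ≠ p := by
          have := List.of_mem_filter hxr
          simpa using this
        have hxm : x ∈ rest := List.mem_of_mem_filter hxr
        rw [hk]
        simp only [List.mem_append, List.mem_singleton]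
        rintro (h1 | h1)
        · exact hfresh x (by simp [hxm]) h1
        · exact hxp h1

-- ===== VERDICT (by name: the statement is the Claim_ definition above) =====
theorem action_to_index_dict_spec : Claim_equal_action_to_index_dict := by
  intro data _ _
  unfold Spec_action_to_index_dict action_to_index_dict action_to_index_dict_alt
  set qs := data.map (fun d => process_file_name (pvFileName d)) with hqs
  have hA : data.foldl
      (fun (st : PySem.Dict String Int × Int) d =>
        let p := process_file_name (pvFileName d)
        if st.1.contains p then st else (st.1.insert p st.2, st.2 + 1))
      (PySem.Dict.empty, 0)
      = qs.foldl (fun (st : PySem.Dict String Int × Int) p =>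
        if st.1.contains p then st else (st.1.insert p st.2, st.2 + 1)) (PySem.Dict.empty, 0) := by
    rw [hqs, List.foldl_map]
  have hempty : (PySem.Dict.empty : PySem.Dict String Int).keys = [] := by
    simp [PySem.Dict.empty, PySem.Dict.keys]
  rw [hA, pvA_fold,
    pvLoop_eq_pvRef qs.length qs le_rfl PySem.Dict.empty 0
      (by intro x _ hx; rw [hempty] at hx; simp at hx)]
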